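-- pv_equiv track=rewrite | github.com/Et0ZheMax/UsersDash | RSSv7/RssCounterWebV7.py | _extract_last_cycles
-- ===== SOURCE A (Python) =====
-- def _extract_last_cycles(rows: list[tuple[str, str, str | None]]):
--     """
--     Возвращает (предыдущий цикл, последний цикл, dt_последнего Account Done).
--
--     rows — список (dt, raw_line, nickname) в хронологическом порядке.
--     Если не хватает завершённых циклов — возвращает (None, None, None).
--     """
--
--     done_idx = [i for i, (_, raw, _) in enumerate(rows) if "account done" in raw.lower()]
--     if len(done_idx) < 2:
--         return None, None, None
--
--     last_end = done_idx[-1]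
--     prev_end = done_idx[-2]
--
--     prev_start = done_idx[-3] + 1 if len(done_idx) >= 3 else 0
--
--     prev_cycle = [raw for _, raw, _ in rows[prev_start : prev_end + 1]]
--     last_cycle = [raw for _, raw, _ in rows[prev_end + 1 : last_end + 1]]
--     last_done_dt = rows[last_end][0]
--
--     return prev_cycle, last_cycle, last_done_dt
-- ===== SOURCE B (Python) =====
-- def _extract_last_cycles(rows: list[tuple[str, str, str | None]]):
--     """One backwards pass: build the two cycles directly while scanning from the
--     end, stopping at the third 'account done' marker (no index list, no slicing)."""
--     state = 0          # 0 = before last done, 1 = inside last cycle, 2 = inside prev cycle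
--     last_cycle = []
--     prev_cycle = []
--     last_dt = None
--     for dt, raw, _ in reversed(rows):
--         done = "account done" in raw.lower()
--         if state == 0:
--             if done:
--                 last_cycle.append(raw)
--                 last_dt = dt
--                 state = 1
--         elif state == 1:
--             if done:
--                 prev_cycle.append(raw)
--                 state = 2
--             else:
--                 last_cycle.append(raw)
--         else:
--             if done:
--                 break
--             prev_cycle.append(raw)
--     if state < 2:
--         return None, None, None
--     prev_cycle.reverse()
--     last_cycle.reverse()
--     return prev_cycle, last_cycle, last_dt
-- ===== Notes on version B (the rewrite author's own statement) =====
-- stated objective: alternative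
-- what changed: Replaces the full forward index-comprehension plus negative indexing and two slices by a single backwards scan over the rows that builds the two cycle line-lists and the timestamp directly with a small state machine, stopping at the third 'account done' marker.
import Mathlib
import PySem

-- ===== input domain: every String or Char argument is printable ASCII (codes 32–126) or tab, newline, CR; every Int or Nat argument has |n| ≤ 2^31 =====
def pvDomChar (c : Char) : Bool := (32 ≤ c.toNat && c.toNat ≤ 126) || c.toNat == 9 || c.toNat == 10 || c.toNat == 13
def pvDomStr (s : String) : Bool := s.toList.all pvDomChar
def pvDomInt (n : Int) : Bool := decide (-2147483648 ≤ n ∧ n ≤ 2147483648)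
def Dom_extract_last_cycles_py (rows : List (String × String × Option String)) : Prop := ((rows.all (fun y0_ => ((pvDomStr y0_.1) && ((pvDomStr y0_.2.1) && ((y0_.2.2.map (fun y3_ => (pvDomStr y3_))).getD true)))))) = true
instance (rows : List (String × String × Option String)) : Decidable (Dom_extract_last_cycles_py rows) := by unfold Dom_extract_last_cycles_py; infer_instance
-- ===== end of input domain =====

-- B replaces A's forward index-comprehension + negative indexing + slicing by one backwards
-- state-machine scan that builds both cycles directly and stops at the third marker ("alternative").

-- shared helper: the membership test '"account done" in raw.lower()'
def pvPred (r : String × String × Option String) : Bool :=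
  PySem.Str.isIn "account done" (PySem.Str.lower r.2.1)

-- ===== PORT A =====
def extract_last_cycles_py (rows : List (String × String × Option String)) : Option (List String) × Option (List String) × Option String :=
  let done_idx := ((PySem.List.enumerate rows 0).filter (fun p => pvPred p.2)).map (fun p => p.1)
  if done_idx.length < 2 then (none, none, none)
  else
    let last_end := (PySem.List.pyGet? done_idx (-1)).getD 0
    let prev_end := (PySem.List.pyGet? done_idx (-2)).getD 0
    let prev_start := if 3 ≤ done_idx.length then (PySem.List.pyGet? done_idx (-3)).getD 0 + 1 else 0
    let prev_cycle := (PySem.List.slice rows (some prev_start) (some (prev_end + 1))).map (fun r => r.2.1)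
    let last_cycle := (PySem.List.slice rows (some (prev_end + 1)) (some (last_end + 1))).map (fun r => r.2.1)
    let last_done_dt := ((PySem.List.pyGet? rows last_end).getD ("", "", none)).1
    (some prev_cycle, some last_cycle, some last_done_dt)

-- ===== PORT B =====
-- the backwards loop of Source B: state 0 = before the last marker, 1 = inside the last
-- cycle, 2 = inside the previous cycle; a marker seen in state 2 is the 'break'
def pvGoB : List (String × String × Option String) → Nat → List String → List String → Option String → Nat × List String × List String × Option String
  | [], st, lc, pc, dt => (st, lc, pc, dt)
  | r :: rest, st, lc, pc, dt =>
    if st == 0 then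
      if pvPred r then pvGoB rest 1 (lc ++ [r.2.1]) pc (some r.1)
      else pvGoB rest 0 lc pc dt
    else if st == 1 then
      if pvPred r then pvGoB rest 2 lc (pc ++ [r.2.1]) dt
      else pvGoB rest 1 (lc ++ [r.2.1]) pc dt
    else
      if pvPred r then (st, lc, pc, dt)
      else pvGoB rest st lc (pc ++ [r.2.1]) dt

def extract_last_cycles_py_alt (rows : List (String × String × Option String)) : Option (List String) × Option (List String) × Option String :=
  let res := pvGoB rows.reverse 0 [] [] none
  if res.1 < 2 then (none, none, none)
  else (some res.2.2.1.reverse, some res.2.1.reverse, res.2.2.2)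

-- ===== PRECONDITION & SPEC =====
def Spec_extract_last_cycles_py (rows : List (String × String × Option String)) (out : Option (List String) × Option (List String) × Option String) : Prop := out = extract_last_cycles_py_alt rows
instance (rows : List (String × String × Option String)) (out : Option (List String) × Option (List String) × Option String) : Decidable (Spec_extract_last_cycles_py rows out) := by unfold Spec_extract_last_cycles_py; infer_instance

-- ===== CLAIM (what is proved, stated in full; the proofs are below) =====
def Claim_equal_extract_last_cycles_py : Prop := ∀ (rows : List (String × String × Option String)), Dom_extract_last_cycles_py rows → Spec_extract_last_cycles_py rows (extract_last_cycles_py rows)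

-- ===== LEMMAS AND PROOFS =====

-- A's comprehension, with a general enumeration start (proof-side view of A's done_idx)
def pvDIF (s : Int) (l : List (String × String × Option String)) : List Int :=
  ((PySem.List.enumerate l s).filter (fun p => pvPred p.2)).map (fun p => p.1)

theorem pvDIF_clean (s : Int) (l : List (String × String × Option String))
    (h : ∀ x ∈ l, pvPred x = false) : pvDIF s l = [] := by
  induction l generalizing s with
  | nil => rfl
  | cons a t ih =>
    have ha : pvPred a = false := h a (by simp)
    have ht : ∀ x ∈ t, pvPred x = false := fun x hx => h x (by simp [hx])
    have := ih (s + 1) ht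
    simp [pvDIF, PySem.List.enumerate_cons, ha] at this ⊢
    exact this

theorem pvDIF_append (s : Int) (t u : List (String × String × Option String)) :
    pvDIF s (t ++ u) = pvDIF s t ++ pvDIF (s + t.length) u := by
  simp [pvDIF, PySem.List.enumerate_append]

theorem pvDIF_cons_hit (s : Int) (r : String × String × Option String)
    (u : List (String × String × Option String)) (h : pvPred r = true) :
    pvDIF s (r :: u) = s :: pvDIF (s + 1) u := by
  simp [pvDIF, PySem.List.enumerate_cons, h]

-- split off the LAST matching element
theorem pvSplitLast (l : List (String × String × Option String))
    (h : l.filter pvPred ≠ []) :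
    ∃ u r v, l = u ++ r :: v ∧ pvPred r = true ∧ (∀ x ∈ v, pvPred x = false) ∧
      u.filter pvPred = (l.filter pvPred).dropLast := by
  induction l using List.reverseRecOn with
  | nil => simp at h
  | append_singleton t x ih =>
    by_cases hx : pvPred x = true
    · exact ⟨t, x, [], by simp, hx, by simp, by simp [List.filter_append, hx]⟩
    · have hx' : pvPred x = false := by simpa using hx
      have hf : (t ++ [x]).filter pvPred = t.filter pvPred := by
        simp [List.filter_append, hx']
      rw [hf] at h
      obtain ⟨u, r, v, ht, hr, hv, hu⟩ := ih h
      refine ⟨u, r, v ++ [x], by simp [ht], hr, ?_, by rw [hu, hf]⟩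
      intro y hy
      rcases List.mem_append.mp hy with h1 | h1
      · exact hv y h1
      · simp at h1; subst h1; exact hx'

theorem pvTakeWhile_clean (t : List (String × String × Option String))
    (h : ∀ x ∈ t, pvPred x = false) : t.takeWhile (fun x => !pvPred x) = t := by
  induction t with
  | nil => rfl
  | cons a u ih =>
    have hu : ∀ x ∈ u, pvPred x = false := fun x hx => h x (List.mem_cons_of_mem _ hx)
    simp [h a (by simp), ih hu]

theorem pvTakeWhile_clean_append (t z : List (String × String × Option String))
    (r : String × String × Option String)
    (h : ∀ x ∈ t, pvPred x = false) (hr : pvPred r = true) :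
    (t ++ r :: z).takeWhile (fun x => !pvPred x) = t := by
  induction t with
  | nil => simp [hr]
  | cons a u ih =>
    have hu : ∀ x ∈ u, pvPred x = false := fun x hx => h x (List.mem_cons_of_mem _ hx)
    simp [h a (by simp), ih hu]

theorem pvCleanRev (t : List (String × String × Option String))
    (h : ∀ x ∈ t, pvPred x = false) : ∀ x ∈ t.reverse, pvPred x = false := by
  intro x hx; exact h x (List.mem_reverse.mp hx)

theorem pvCleanOf (t : List (String × String × Option String))
    (h : t.filter pvPred = []) : ∀ x ∈ t, pvPred x = false := by
  intro x hx; have := List.filter_eq_nil_iff.mp h x hx; simpa using this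

theorem pvGoB_state0_skip (t rest : List (String × String × Option String))
    (lc pc : List String) (dt : Option String) (h : ∀ x ∈ t, pvPred x = false) :
    pvGoB (t ++ rest) 0 lc pc dt = pvGoB rest 0 lc pc dt := by
  induction t with
  | nil => rfl
  | cons a u ih =>
    have ha : pvPred a = false := h a (by simp)
    have hu : ∀ x ∈ u, pvPred x = false := fun x hx => h x (by simp [hx])
    simp [pvGoB, ha, ih hu]

theorem pvGoB_state1_skip (t rest : List (String × String × Option String))
    (lc pc : List String) (dt : Option String) (h : ∀ x ∈ t, pvPred x = false) :
    pvGoB (t ++ rest) 1 lc pc dt = pvGoB rest 1 (lc ++ t.map (fun r => r.2.1)) pc dt := by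
  induction t generalizing lc with
  | nil => simp
  | cons a u ih =>
    have ha : pvPred a = false := h a (by simp)
    have hu : ∀ x ∈ u, pvPred x = false := fun x hx => h x (by simp [hx])
    simp [pvGoB, ha]
    rw [ih _ hu]; simp

theorem pvGoB_state2 (rest : List (String × String × Option String))
    (lc pc : List String) (dt : Option String) :
    pvGoB rest 2 lc pc dt =
      (2, lc, pc ++ (rest.takeWhile (fun x => !pvPred x)).map (fun r => r.2.1), dt) := by
  induction rest generalizing pc with
  | nil => simp [pvGoB]
  | cons a u ih =>
    by_cases h : pvPred a = true
    · simp [pvGoB, *]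
    · simp at h
      simp [pvGoB, *]

theorem pvGoB_hit0 (r : String × String × Option String)
    (rest : List (String × String × Option String)) (lc pc : List String)
    (dt : Option String) (h : pvPred r = true) :
    pvGoB (r :: rest) 0 lc pc dt = pvGoB rest 1 (lc ++ [r.2.1]) pc (some r.1) := by
  simp [pvGoB, h]

theorem pvGoB_hit1 (r : String × String × Option String)
    (rest : List (String × String × Option String)) (lc pc : List String)
    (dt : Option String) (h : pvPred r = true) :
    pvGoB (r :: rest) 1 lc pc dt = pvGoB rest 2 lc (pc ++ [r.2.1]) dt := by
  simp [pvGoB, h]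

theorem pvGoB_state0_clean (t : List (String × String × Option String))
    (lc pc : List String) (dt : Option String) (h : ∀ x ∈ t, pvPred x = false) :
    pvGoB t 0 lc pc dt = (0, lc, pc, dt) := by
  simpa using pvGoB_state0_skip t [] lc pc dt h

theorem pvGoB_state1_clean (t : List (String × String × Option String))
    (lc pc : List String) (dt : Option String) (h : ∀ x ∈ t, pvPred x = false) :
    pvGoB t 1 lc pc dt = (1, lc ++ t.map (fun r => r.2.1), pc, dt) := by
  simpa using pvGoB_state1_skip t [] lc pc dt h


theorem pvEq (rows : List (String × String × Option String)) :
    extract_last_cycles_py rows = extract_last_cycles_py_alt rows := by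
  by_cases h1 : rows.filter pvPred = []
  · have hcl := pvCleanOf rows h1
    have hA : ((PySem.List.enumerate rows (0:Int)).filter (fun p => pvPred p.2)).map (fun p => p.1) = ([] : List Int) := pvDIF_clean 0 rows hcl
    have hB : pvGoB rows.reverse 0 [] [] none = (0, [], [], none) :=
      pvGoB_state0_clean _ _ _ _ (pvCleanRev rows hcl)
    simp [extract_last_cycles_py, extract_last_cycles_py_alt, hA, hB]
  · obtain ⟨u, r1, c, hru, hr1, hc, hu⟩ := pvSplitLast rows h1
    by_cases h2 : u.filter pvPred = []
    · -- exactly one marker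
      have hucl := pvCleanOf u h2
      have hA : ((PySem.List.enumerate rows (0:Int)).filter (fun p => pvPred p.2)).map (fun p => p.1) = [(u.length : Int)] := by
        show pvDIF 0 rows = _
        rw [hru, pvDIF_append, pvDIF_clean _ u hucl, pvDIF_cons_hit _ _ _ hr1, pvDIF_clean _ c hc]
        simp
      have hrev : rows.reverse = c.reverse ++ r1 :: u.reverse := by rw [hru]; simp
      have hB : pvGoB rows.reverse 0 [] [] none = (1, r1.2.1 :: u.reverse.map (fun r => r.2.1), [], some r1.1) := by
        rw [hrev, pvGoB_state0_skip _ _ _ _ _ (pvCleanRev c hc), pvGoB_hit0 _ _ _ _ _ hr1,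
          pvGoB_state1_clean _ _ _ _ (pvCleanRev u hucl)]
        simp
      simp [extract_last_cycles_py, extract_last_cycles_py_alt, hA, hB]
    · obtain ⟨p, r2, b, hup, hr2, hb, hp⟩ := pvSplitLast u h2
      have hrows : rows = p ++ r2 :: (b ++ r1 :: c) := by rw [hru, hup]; simp
      have hrows2 : rows = (p ++ r2 :: b) ++ r1 :: c := by rw [hrows]; simp
      have hrev : rows.reverse = c.reverse ++ r1 :: (b.reverse ++ r2 :: p.reverse) := by
        rw [hrows]; simp
      have hdt : (PySem.List.pyGet? rows ((p.length:Int)+1+(b.length:Int))).getD ("", "", none) = r1 := by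
        have e1 : ((p.length:Int)+1+(b.length:Int)) = (((p ++ r2 :: b).length : Nat) : Int) := by
          simp; ring
        rw [hrows2, e1, PySem.List.pyGet?_append_length]; rfl
      have hsl2 : PySem.List.slice rows (some ((p.length:Int)+1)) (some ((p.length:Int)+1+(b.length:Int)+1)) = b ++ [r1] := by
        have e1 : ((p.length:Int)+1) = ((p.length+1 : Nat) : Int) := by push_cast; ring
        have e2 : ((p.length:Int)+1+(b.length:Int)+1) = ((p.length+1+(b.length+1) : Nat) : Int) := by push_cast; ring
        rw [e2, e1, PySem.List.slice_natCast]
        have e3 : p.length + 1 + (b.length + 1) - (p.length + 1) = b.length + 1 := by omega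
        rw [e3]
        have e4 : rows.drop (p.length + 1) = b ++ r1 :: c := by
          rw [hrows, show p.length + 1 = (p ++ [r2]).length by simp,
            show p ++ r2 :: (b ++ r1 :: c) = (p ++ [r2]) ++ (b ++ r1 :: c) by simp,
            List.drop_left]
        rw [e4, List.take_length_add_append]; simp
      by_cases h3 : p.filter pvPred = []
      · -- exactly two markers
        have hpcl := pvCleanOf p h3
        have hA : ((PySem.List.enumerate rows (0:Int)).filter (fun p => pvPred p.2)).map (fun p => p.1) = [(p.length : Int), (p.length : Int) + 1 + (b.length : Int)] := by
          show pvDIF 0 rows = _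
          rw [hrows, pvDIF_append, pvDIF_clean _ p hpcl, pvDIF_cons_hit _ _ _ hr2,
            pvDIF_append, pvDIF_clean _ b hb, pvDIF_cons_hit _ _ _ hr1, pvDIF_clean _ c hc]
          simp
        have hsl1 : PySem.List.slice rows (some (0:Int)) (some ((p.length:Int)+1)) = p ++ [r2] := by
          have e1 : ((p.length:Int)+1) = ((p.length+1 : Nat) : Int) := by push_cast; ring
          rw [e1, PySem.List.slice_zero_start, PySem.List.slice_to_natCast, hrows, List.take_length_add_append]
          simp
        have hB : pvGoB rows.reverse 0 [] [] none =
            (2, r1.2.1 :: b.reverse.map (fun r => r.2.1), r2.2.1 :: p.reverse.map (fun r => r.2.1), some r1.1) := by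
          rw [hrev, pvGoB_state0_skip _ _ _ _ _ (pvCleanRev c hc), pvGoB_hit0 _ _ _ _ _ hr1,
            pvGoB_state1_skip _ _ _ _ _ (pvCleanRev b hb), pvGoB_hit1 _ _ _ _ _ hr2,
            pvGoB_state2, pvTakeWhile_clean _ (pvCleanRev p hpcl)]
          simp
        simp only [extract_last_cycles_py, extract_last_cycles_py_alt, hA, hB]
        rw [if_neg (by simp), if_neg (by simp)]
        rw [show (PySem.List.pyGet? [(p.length : Int), (p.length : Int) + 1 + (b.length : Int)] (-1)).getD 0 = (p.length : Int) + 1 + (b.length : Int) by rw [PySem.List.pyGet?_neg_one]; rfl]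
        rw [show (PySem.List.pyGet? [(p.length : Int), (p.length : Int) + 1 + (b.length : Int)] (-2)).getD 0 = (p.length : Int) by rw [PySem.List.pyGet?_neg_ofNat _ 2 (by norm_num) (by simp)]; rfl]
        rw [hsl1, hsl2, hdt]
        simp
      · -- three or more markers
        obtain ⟨q, r3, e, hpq, hr3, he, _⟩ := pvSplitLast p h3
        have hdp : pvDIF 0 p = pvDIF 0 q ++ [(q.length : Int)] := by
          rw [hpq, pvDIF_append, pvDIF_cons_hit _ _ _ hr3, pvDIF_clean _ e he]
          simp
        have hA : ((PySem.List.enumerate rows (0:Int)).filter (fun p => pvPred p.2)).map (fun p => p.1) = (pvDIF 0 q ++ [(q.length : Int)]) ++ [(p.length : Int), (p.length : Int) + 1 + (b.length : Int)] := by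
          show pvDIF 0 rows = _
          rw [hrows, pvDIF_append, hdp, pvDIF_cons_hit _ _ _ hr2,
            pvDIF_append, pvDIF_clean _ b hb, pvDIF_cons_hit _ _ _ hr1, pvDIF_clean _ c hc]
          simp
        have hsl1 : PySem.List.slice rows (some ((q.length:Int)+1)) (some ((p.length:Int)+1)) = e ++ [r2] := by
          have e1 : ((q.length:Int)+1) = ((q.length+1 : Nat) : Int) := by push_cast; ring
          have e2 : ((p.length:Int)+1) = ((p.length+1 : Nat) : Int) := by push_cast; ring
          rw [e1, e2, PySem.List.slice_natCast]
          have e3 : rows.drop (q.length + 1) = e ++ r2 :: (b ++ r1 :: c) := by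
            rw [hrows, hpq, show q.length + 1 = (q ++ [r3]).length by simp,
              show (q ++ r3 :: e) ++ r2 :: (b ++ r1 :: c) = (q ++ [r3]) ++ (e ++ r2 :: (b ++ r1 :: c)) by simp,
              List.drop_left]
          have e4 : p.length + 1 - (q.length + 1) = e.length + 1 := by rw [hpq]; simp
          rw [e3, e4, List.take_length_add_append]
          simp
        have hB : pvGoB rows.reverse 0 [] [] none =
            (2, r1.2.1 :: b.reverse.map (fun r => r.2.1), r2.2.1 :: e.reverse.map (fun r => r.2.1), some r1.1) := by
          rw [hrev, pvGoB_state0_skip _ _ _ _ _ (pvCleanRev c hc), pvGoB_hit0 _ _ _ _ _ hr1,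
            pvGoB_state1_skip _ _ _ _ _ (pvCleanRev b hb), pvGoB_hit1 _ _ _ _ _ hr2,
            pvGoB_state2, hpq, show (q ++ r3 :: e).reverse = e.reverse ++ r3 :: q.reverse by simp,
            pvTakeWhile_clean_append _ _ _ (pvCleanRev e he) hr3]
          simp
        simp only [extract_last_cycles_py, extract_last_cycles_py_alt, hA, hB]
        rw [if_neg (by simp), if_pos (by simp)]
        rw [show (PySem.List.pyGet? ((pvDIF 0 q ++ [(q.length : Int)]) ++ [(p.length : Int), (p.length : Int) + 1 + (b.length : Int)]) (-1)).getD 0 = (p.length : Int) + 1 + (b.length : Int) by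
          rw [show (pvDIF 0 q ++ [(q.length : Int)]) ++ [(p.length : Int), (p.length : Int) + 1 + (b.length : Int)] = ((pvDIF 0 q ++ [(q.length : Int)]) ++ [(p.length : Int)]) ++ [(p.length : Int) + 1 + (b.length : Int)] by simp,
            PySem.List.pyGet?_neg_one, List.getLast?_concat]; rfl]
        rw [show (PySem.List.pyGet? ((pvDIF 0 q ++ [(q.length : Int)]) ++ [(p.length : Int), (p.length : Int) + 1 + (b.length : Int)]) (-2)).getD 0 = (p.length : Int) by
          rw [PySem.List.pyGet?_neg_ofNat _ 2 (by norm_num) (by simp),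
            show ((pvDIF 0 q ++ [(q.length : Int)]) ++ [(p.length : Int), (p.length : Int) + 1 + (b.length : Int)]).length - 2 = (pvDIF 0 q ++ [(q.length : Int)]).length by simp,
            List.getElem?_append_right (by omega)]
          simp]
        rw [show (PySem.List.pyGet? ((pvDIF 0 q ++ [(q.length : Int)]) ++ [(p.length : Int), (p.length : Int) + 1 + (b.length : Int)]) (-3)).getD 0 = (q.length : Int) by
          rw [PySem.List.pyGet?_neg_ofNat _ 3 (by norm_num) (by simp),
            show ((pvDIF 0 q ++ [(q.length : Int)]) ++ [(p.length : Int), (p.length : Int) + 1 + (b.length : Int)]).length - 3 = (pvDIF 0 q).length by simp,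
            show (pvDIF 0 q ++ [(q.length : Int)]) ++ [(p.length : Int), (p.length : Int) + 1 + (b.length : Int)] = pvDIF 0 q ++ ([(q.length : Int)] ++ [(p.length : Int), (p.length : Int) + 1 + (b.length : Int)]) by simp,
            List.getElem?_append_right (by omega)]
          simp]
        rw [hsl1, hsl2, hdt]
        simp

-- ===== VERDICT (by name: the statement is the Claim_ definition above) =====
theorem extract_last_cycles_py_spec : Claim_equal_extract_last_cycles_py := by
  intro rows _
  show _ = _
  exact pvEq rows
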